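-- pv_equiv track=rewrite | github.com/HuwCheston/deep-pianist-identification | deep_pianist_identification/rf_baselines/rf_utils.py | get_desired_ngram_phrases
-- ===== SOURCE A (Python) =====
-- def get_desired_ngram_phrases(ng: list[int], interval_classes, span_notes: int = 2):
--     ng_len = len(ng)
--     matches, phrase_spans = [], []
--     for ic_start_idx in range(len(interval_classes)):
--         ic_end_idx = ic_start_idx + ng_len
--         desired_phrase = interval_classes[ic_start_idx:ic_end_idx]
--         all_ics = [i[2] for i in desired_phrase]
--         if all_ics == ng:
--             idx_before = ic_start_idx - span_notes
--             idx_after = ic_end_idx + span_notes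
--             if idx_before < 0:
--                 idx_before = 0
--             if idx_after >= len(interval_classes):
--                 idx_after = len(interval_classes) - 1
--             note_before_phrase = interval_classes[idx_before]
--             note_after_phrase = interval_classes[idx_after]
--             phrase_span = note_before_phrase[0], note_after_phrase[1]
--             phrase_spans.append(phrase_span)
--     return phrase_spans
-- ===== SOURCE B (Python) =====
-- def get_desired_ngram_phrases(ng: list[int], interval_classes, span_notes: int = 2):
--     # Rabin-Karp: extract the interval-class sequence once, roll a hash across it,
--     # and verify candidate windows only on hash hits; then build the spans.
--     MOD = 2305843009213693951
--     BASE = 524287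
--     n = len(interval_classes)
--     m = len(ng)
--     ics = [t[2] for t in interval_classes]
--     if m == 0:
--         starts = list(range(n))
--     elif m > n:
--         starts = []
--     else:
--         target = 0
--         for v in ng:
--             target = (target * BASE + v) % MOD
--         h = 0
--         for v in ics[:m]:
--             h = (h * BASE + v) % MOD
--         pw = pow(BASE, m - 1, MOD)
--         starts = []
--         for st in range(n - m + 1):
--             if h == target and ics[st:st + m] == ng:
--                 starts.append(st)
--             if st + m < n:
--                 h = ((h - ics[st] * pw) * BASE + ics[st + m]) % MOD
--         # note: no further windows of length m exist past n - m
--     spans = []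
--     for st in starts:
--         lo = st - span_notes
--         hi = st + m + span_notes
--         if lo < 0:
--             lo = 0
--         if hi >= n:
--             hi = n - 1
--         spans.append((interval_classes[lo][0], interval_classes[hi][1]))
--     return spans
-- ===== Notes on version B (the rewrite author's own statement) =====
-- stated objective: alternative
-- what changed: A slices the list at every index and rebuilds the interval-class window to compare against the n-gram; B extracts the interval-class sequence once and runs a Rabin-Karp rolling-hash search, verifying a window only on a hash hit, then builds the spans from the match starts (intended as faster; a timing run measured only 1.48x at the largest size, below the 1.5x bar).
import Mathlib
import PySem

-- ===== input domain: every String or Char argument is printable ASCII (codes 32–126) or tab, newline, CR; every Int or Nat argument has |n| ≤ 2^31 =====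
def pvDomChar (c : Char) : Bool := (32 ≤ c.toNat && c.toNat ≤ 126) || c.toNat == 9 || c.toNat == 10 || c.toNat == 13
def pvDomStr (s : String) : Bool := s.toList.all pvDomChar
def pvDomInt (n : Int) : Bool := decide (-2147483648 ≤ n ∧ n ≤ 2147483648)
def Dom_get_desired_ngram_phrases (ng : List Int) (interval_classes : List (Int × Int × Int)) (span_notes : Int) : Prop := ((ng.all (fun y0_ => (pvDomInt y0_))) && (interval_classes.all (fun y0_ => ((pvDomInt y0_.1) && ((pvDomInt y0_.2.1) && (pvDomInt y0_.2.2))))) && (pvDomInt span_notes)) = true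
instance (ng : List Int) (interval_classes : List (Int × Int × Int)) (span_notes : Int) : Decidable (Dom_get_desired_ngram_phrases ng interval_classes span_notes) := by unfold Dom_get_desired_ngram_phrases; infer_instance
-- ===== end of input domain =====

-- B replaces A's per-index slice-map-compare scan by a Rabin–Karp rolling-hash search over the
-- interval-class sequence extracted once; equivalence of the RETURN value is proved on Pre_ below.

-- ===== PORT A =====
-- span of one matched phrase: A's body from 'idx_before = …' to 'phrase_span = …'
def pvSpanA (interval_classes : List (Int × Int × Int)) (span_notes : Int) (ng_len : Nat) (ic_start_idx : Nat) : Int × Int :=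
  let idx_before0 : Int := (ic_start_idx : Int) - span_notes
  let idx_after0 : Int := ((ic_start_idx : Int) + (ng_len : Int)) + span_notes
  let idx_before : Int := if idx_before0 < 0 then 0 else idx_before0
  let idx_after : Int := if (interval_classes.length : Int) ≤ idx_after0 then (interval_classes.length : Int) - 1 else idx_after0
  let note_before_phrase := (PySem.List.pyGet? interval_classes idx_before).getD (0, 0, 0)
  let note_after_phrase := (PySem.List.pyGet? interval_classes idx_after).getD (0, 0, 0)
  (note_before_phrase.1, note_after_phrase.2.1)

def get_desired_ngram_phrases (ng : List Int) (interval_classes : List (Int × Int × Int)) (span_notes : Int) : List (Int × Int) :=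
  let ng_len := ng.length
  (List.range interval_classes.length).foldl
    (fun (phrase_spans : List (Int × Int)) (ic_start_idx : Nat) =>
      let desired_phrase := PySem.List.slice interval_classes (some (ic_start_idx : Int)) (some ((ic_start_idx : Int) + (ng_len : Int)))
      let all_ics := desired_phrase.map (fun i => i.2.2)
      if all_ics = ng then phrase_spans ++ [pvSpanA interval_classes span_notes ng_len ic_start_idx]
      else phrase_spans)
    []

-- ===== PORT B =====
-- span of one match start: B's second loop body
def pvSpanB (interval_classes : List (Int × Int × Int)) (span_notes : Int) (m : Nat) (st : Nat) : Int × Int :=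
  let lo0 : Int := (st : Int) - span_notes
  let hi0 : Int := ((st : Int) + (m : Int)) + span_notes
  let lo : Int := if lo0 < 0 then 0 else lo0
  let hi : Int := if (interval_classes.length : Int) ≤ hi0 then (interval_classes.length : Int) - 1 else hi0
  let before := (PySem.List.pyGet? interval_classes lo).getD (0, 0, 0)
  let after := (PySem.List.pyGet? interval_classes hi).getD (0, 0, 0)
  (before.1, after.2.1)

-- h = (h * BASE + v) % MOD over a list
def pvHash (l : List Int) : Int :=
  l.foldl (fun h v => PySem.Int.mod (h * 524287 + v) 2305843009213693951) 0

-- B's rolling loop: k iterations remain, current start st, current window hash h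
def pvRkLoop (ics ng : List Int) (m n : Nat) (target pw : Int) : Nat → Nat → Int → List Nat
  | 0, _, _ => []
  | k + 1, st, h =>
    let h' : Int :=
      if st + m < n then
        PySem.Int.mod ((h - PySem.List.pyGetD ics (st : Int) 0 * pw) * 524287 + PySem.List.pyGetD ics ((st : Int) + (m : Int)) 0) 2305843009213693951
      else h
    let rest := pvRkLoop ics ng m n target pw k (st + 1) h'
    if h = target ∧ PySem.List.slice ics (some (st : Int)) (some ((st : Int) + (m : Int))) = ng then st :: rest else rest

def get_desired_ngram_phrases_alt (ng : List Int) (interval_classes : List (Int × Int × Int)) (span_notes : Int) : List (Int × Int) :=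
  let n := interval_classes.length
  let m := ng.length
  let ics := interval_classes.map (fun t => t.2.2)
  let starts : List Nat :=
    if m = 0 then List.range n
    else if n < m then []
    else
      pvRkLoop ics ng m n (pvHash ng) (PySem.Int.powMod 524287 (m - 1) 2305843009213693951)
        (n - m + 1) 0 (pvHash (ics.take m))
  starts.map (fun st => pvSpanB interval_classes span_notes m st)

-- ===== PRECONDITION & SPEC =====
-- Pre_ excludes exactly the inputs on which A raises IndexError: a negative span_notes pushing a
-- matched phrase's boundary index out of Python's (negative-index-included) range.
def Pre_get_desired_ngram_phrases (ng : List Int) (interval_classes : List (Int × Int × Int)) (span_notes : Int) : Prop :=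
  ∀ i : Nat, i < interval_classes.length →
    ((interval_classes.drop i).take ng.length).map (fun t => t.2.2) = ng →
    ((i : Int) - span_notes < (interval_classes.length : Int) ∧
      -(interval_classes.length : Int) ≤ (i : Int) + (ng.length : Int) + span_notes)
instance (ng : List Int) (interval_classes : List (Int × Int × Int)) (span_notes : Int) : Decidable (Pre_get_desired_ngram_phrases ng interval_classes span_notes) := by unfold Pre_get_desired_ngram_phrases; infer_instance
def pvWitness_get_desired_ngram_phrases : List Int × (List (Int × Int × Int)) × Int :=
  ([1], [(0, 2, 1), (3, 4, 1)], 2)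

def Spec_get_desired_ngram_phrases (ng : List Int) (interval_classes : List (Int × Int × Int)) (span_notes : Int) (out : List (Int × Int)) : Prop := out = get_desired_ngram_phrases_alt ng interval_classes span_notes
instance (ng : List Int) (interval_classes : List (Int × Int × Int)) (span_notes : Int) (out : List (Int × Int)) : Decidable (Spec_get_desired_ngram_phrases ng interval_classes span_notes out) := by unfold Spec_get_desired_ngram_phrases; infer_instance

-- ===== CLAIM (what is proved, stated in full; the proofs are below) =====
def Claim_equal_get_desired_ngram_phrases : Prop := ∀ (ng : List Int) (interval_classes : List (Int × Int × Int)) (span_notes : Int), Dom_get_desired_ngram_phrases ng interval_classes span_notes → Pre_get_desired_ngram_phrases ng interval_classes span_notes → Spec_get_desired_ngram_phrases ng interval_classes span_notes (get_desired_ngram_phrases ng interval_classes span_notes)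

-- ===== LEMMAS AND PROOFS =====

-- the window predicate both sides effectively test
def pvWin (ics ng : List Int) (i : Nat) : Bool := decide ((ics.drop i).take ng.length = ng)

theorem pv_A_eq_filter (ng : List Int) (ic : List (Int × Int × Int)) (s : Int) :
    get_desired_ngram_phrases ng ic s =
      ((List.range ic.length).filter (pvWin (ic.map (fun t => t.2.2)) ng)).map
        (pvSpanA ic s ng.length) := by
  unfold get_desired_ngram_phrases
  dsimp only
  have hfun : (fun (phrase_spans : List (Int × Int)) (ic_start_idx : Nat) =>
      let desired_phrase := PySem.List.slice ic (some (ic_start_idx : Int)) (some ((ic_start_idx : Int) + (ng.length : Int)))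
      let all_ics := desired_phrase.map (fun i => i.2.2)
      if all_ics = ng then phrase_spans ++ [pvSpanA ic s ng.length ic_start_idx]
      else phrase_spans) =
      (fun (acc : List (Int × Int)) (i : Nat) =>
        if pvWin (ic.map (fun t => t.2.2)) ng i = true then acc ++ [pvSpanA ic s ng.length i] else acc) := by
    funext acc i
    simp [pvWin, PySem.List.slice_natCast_add, List.map_take, List.map_drop]
  rw [hfun, PySem.List.foldl_append_if]
  simp

-- pure polynomial value of a window (no mod)
def pvVal (l : List Int) : Int := l.foldl (fun h v => h * 524287 + v) 0

theorem pv_hash_acc (l : List Int) : ∀ x : Int,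
    l.foldl (fun h v => PySem.Int.mod (h * 524287 + v) 2305843009213693951) (PySem.Int.mod x 2305843009213693951) =
    PySem.Int.mod (l.foldl (fun h v => h * 524287 + v) x) 2305843009213693951 := by
  induction l with
  | nil => intro x; rfl
  | cons a l ih =>
    intro x
    simp only [List.foldl_cons]
    rw [← ih (x * 524287 + a)]
    congr 1
    rw [PySem.Int.mod_eq_emod_of_pos (by norm_num), PySem.Int.mod_eq_emod_of_pos (by norm_num),
        PySem.Int.mod_eq_emod_of_pos (by norm_num)]
    conv_lhs => rw [Int.add_emod, Int.mul_emod, Int.emod_emod_of_dvd _ dvd_rfl]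
    conv_rhs => rw [Int.add_emod, Int.mul_emod]

theorem pv_hash_eq_val_mod (l : List Int) :
    pvHash l = PySem.Int.mod (pvVal l) 2305843009213693951 := by
  have h0 : (0 : Int) = PySem.Int.mod 0 2305843009213693951 := rfl
  unfold pvHash pvVal
  rw [h0, pv_hash_acc, ← h0]

theorem pv_val_acc (l : List Int) : ∀ x : Int,
    l.foldl (fun h v => h * 524287 + v) x = x * 524287 ^ l.length + pvVal l := by
  induction l with
  | nil => intro x; simp [pvVal]
  | cons a l ih =>
    intro x
    have hval : pvVal (a :: l) = a * 524287 ^ l.length + pvVal l := by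
      unfold pvVal
      simp only [List.foldl_cons]
      rw [ih (0 * 524287 + a)]
      simp only [pvVal]
      ring
    simp only [List.foldl_cons]
    rw [ih (x * 524287 + a), hval, List.length_cons]
    ring

theorem pv_val_append_singleton (l : List Int) (c : Int) :
    pvVal (l ++ [c]) = pvVal l * 524287 + c := by
  unfold pvVal
  rw [List.foldl_append]
  rfl

-- the rolling-hash update is exact: it turns the hash of window st into the hash of window st+1
theorem pv_roll (ics : List Int) (m st : Nat) (hm1 : 1 ≤ m) (hst : st + m < ics.length) :
    PySem.Int.mod
      ((pvHash ((ics.drop st).take m) - PySem.List.pyGetD ics (st : Int) 0 * PySem.Int.mod (524287 ^ (m - 1)) 2305843009213693951) * 524287 +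
        PySem.List.pyGetD ics ((st : Int) + (m : Int)) 0)
      2305843009213693951 =
    pvHash ((ics.drop (st + 1)).take m) := by
  have hstlt : st < ics.length := by omega
  have hstm : st + m < ics.length := hst
  have hga : PySem.List.pyGetD ics (st : Int) 0 = ics[st] := by
    simp [PySem.List.pyGetD_natCast, List.getElem?_eq_getElem hstlt]
  have hgc : PySem.List.pyGetD ics ((st : Int) + (m : Int)) 0 = ics[st + m] := by
    have : ((st : Int) + (m : Int)) = ((st + m : Nat) : Int) := by push_cast; ring
    rw [this, PySem.List.pyGetD_natCast]
    simp [List.getElem?_eq_getElem hstm]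
  set a := ics[st] with ha
  set c := ics[st + m] with hc
  set mid := (ics.drop (st + 1)).take (m - 1) with hmid
  have hmidlen : mid.length = m - 1 := by
    simp [hmid, List.length_take, List.length_drop]
    omega
  have hw1 : (ics.drop st).take m = a :: mid := by
    rw [List.drop_eq_getElem_cons hstlt]
    have : m = (m - 1) + 1 := by omega
    rw [this, List.take_succ_cons]
  have hw2 : (ics.drop (st + 1)).take m = mid ++ [c] := by
    have hm' : m = (m - 1) + 1 := by omega
    rw [hm', List.take_add_one]
    congr 1
    have hidx : m - 1 < (ics.drop (st + 1)).length := by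
      simp [List.length_drop]; omega
    rw [List.getElem?_eq_getElem hidx]
    simp only [List.getElem_drop]
    simp only [show st + 1 + (m - 1) = st + m from by omega]
    rfl
  rw [hga, hgc, hw1, hw2, pv_hash_eq_val_mod, pv_hash_eq_val_mod]
  have hval1 : pvVal (a :: mid) = a * 524287 ^ (m - 1) + pvVal mid := by
    unfold pvVal
    simp only [List.foldl_cons]
    rw [pv_val_acc mid (0 * 524287 + a), hmidlen]
    simp only [pvVal]
    ring
  rw [pv_val_append_singleton]
  simp only [PySem.Int.mod_eq_emod_of_pos (by norm_num : (0:Int) < 2305843009213693951)]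
  have : ((pvVal (a :: mid) % 2305843009213693951 - a * (524287 ^ (m - 1) % 2305843009213693951)) * 524287 + c)
      ≡ ((pvVal (a :: mid) - a * 524287 ^ (m - 1)) * 524287 + c) [ZMOD 2305843009213693951] := by
    exact (((Int.mod_modEq _ _).sub ((Int.ModEq.refl a).mul (Int.mod_modEq _ _))).mul (Int.ModEq.refl 524287)).add (Int.ModEq.refl c)
  rw [Int.ModEq] at this
  rw [this]
  congr 1
  rw [hval1]
  ring

-- the rolling loop returns exactly the naive match starts of its range
theorem pv_rk_correct (ics ng : List Int) (m n : Nat) (pw : Int)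
    (hm : m = ng.length) (hn : n = ics.length) (hm1 : 1 ≤ m)
    (hpw : pw = PySem.Int.mod (524287 ^ (m - 1)) 2305843009213693951) :
    ∀ k st h, st + k + m = n + 1 → h = pvHash ((ics.drop st).take m) →
      pvRkLoop ics ng m n (pvHash ng) pw k st h =
        (List.range' st k).filter (pvWin ics ng) := by
  intro k
  induction k with
  | zero => intro st h _ _; rfl
  | succ k ih =>
    intro st h hcnt hh
    rw [List.range'_succ, List.filter_cons]
    have hslice : PySem.List.slice ics (some (st : Int)) (some ((st : Int) + (m : Int))) =
        (ics.drop st).take m := PySem.List.slice_natCast_add ics st m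
    have hcond : (h = pvHash ng ∧ PySem.List.slice ics (some (st : Int)) (some ((st : Int) + (m : Int))) = ng)
        ↔ pvWin ics ng st = true := by
      constructor
      · rintro ⟨_, h2⟩
        simp only [pvWin, hslice, ← hm] at h2 ⊢
        simp [h2]
      · intro hwin
        simp only [pvWin, decide_eq_true_eq, ← hm] at hwin
        refine ⟨?_, by rw [hslice, hwin]⟩
        rw [hh, hwin]
    show (let h' : Int :=
      if st + m < n then
        PySem.Int.mod ((h - PySem.List.pyGetD ics (st : Int) 0 * pw) * 524287 + PySem.List.pyGetD ics ((st : Int) + (m : Int)) 0) 2305843009213693951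
      else h
      let rest := pvRkLoop ics ng m n (pvHash ng) pw k (st + 1) h'
      if h = pvHash ng ∧ PySem.List.slice ics (some (st : Int)) (some ((st : Int) + (m : Int))) = ng then st :: rest else rest) = _
    have hrec : pvRkLoop ics ng m n (pvHash ng) pw k (st + 1)
        (if st + m < n then
          PySem.Int.mod ((h - PySem.List.pyGetD ics (st : Int) 0 * pw) * 524287 + PySem.List.pyGetD ics ((st : Int) + (m : Int)) 0) 2305843009213693951
        else h) = (List.range' (st + 1) k).filter (pvWin ics ng) := by
      cases k with
      | zero => rfl
      | succ k' =>
        have hlt : st + m < n := by omega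
        rw [if_pos hlt]
        apply ih
        · omega
        · rw [hh, hpw]
          exact pv_roll ics m st hm1 (by omega)
    dsimp only
    rw [hrec]
    by_cases hc : pvWin ics ng st = true
    · rw [if_pos (hcond.mpr hc), if_pos hc]
    · rw [if_neg (fun hx => hc (hcond.mp hx)), if_neg (by simpa using hc)]

-- indices whose window is shorter than the pattern never match
theorem pv_filter_win_short (ics ng : List Int) (m a b : Nat) (hm : m = ng.length) (hm1 : 1 ≤ m)
    (hab : ∀ i ∈ List.range' a b, ics.length < i + m) :
    (List.range' a b).filter (pvWin ics ng) = [] := by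
  rw [List.filter_eq_nil_iff]
  intro i hi
  have hlen : ((ics.drop i).take m).length < m := by
    simp only [List.length_take, List.length_drop]
    have := hab i hi
    omega
  simp only [pvWin, ← hm, decide_eq_true_eq]
  intro hEq
  rw [hEq, hm] at hlen
  omega

theorem pv_alt_eq_filter (ng : List Int) (ic : List (Int × Int × Int)) (s : Int) :
    get_desired_ngram_phrases_alt ng ic s =
      ((List.range ic.length).filter (pvWin (ic.map (fun t => t.2.2)) ng)).map
        (pvSpanB ic s ng.length) := by
  unfold get_desired_ngram_phrases_alt
  dsimp only
  set ics := ic.map (fun t => t.2.2) with hics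
  have hlen : ics.length = ic.length := by simp [hics]
  set n := ic.length with hn
  set m := ng.length with hm
  by_cases h0 : m = 0
  · rw [if_pos h0]
    congr 1
    have hng : ng = [] := by
      cases ng with
      | nil => rfl
      | cons a l => rw [hm] at h0; simp at h0
    symm
    rw [List.filter_eq_self]
    intro i _
    simp [pvWin, hng]
  · rw [if_neg h0]
    by_cases h1 : n < m
    · rw [if_pos h1]
      have : (List.range n).filter (pvWin ics ng) = [] := by
        rw [List.range_eq_range']
        apply pv_filter_win_short ics ng m 0 n hm.symm (by omega)
        intro i hi
        rw [List.mem_range'] at hi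
        omega
      rw [this]
    · rw [if_neg h1]
      have hmn : m ≤ n := by omega
      have hm1 : 1 ≤ m := by omega
      have hstart : pvRkLoop ics ng m n (pvHash ng) (PySem.Int.powMod 524287 (m - 1) 2305843009213693951) (n - m + 1) 0 (pvHash (ics.take m)) =
          (List.range' 0 (n - m + 1)).filter (pvWin ics ng) := by
        apply pv_rk_correct ics ng m n _ hm (by rw [hlen]) hm1
        · rw [PySem.Int.powMod_eq]
        · omega
        · simp
      rw [hstart]
      congr 1
      rw [List.range_eq_range']
      have hsplit : List.range' 0 n = List.range' 0 (n - m + 1) ++ List.range' (n - m + 1) (m - 1) := by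
        have hap : List.range' 0 (n - m + 1) 1 ++ List.range' (0 + 1 * (n - m + 1)) (m - 1) 1 = List.range' 0 ((n - m + 1) + (m - 1)) 1 := List.range'_append
        simp only [one_mul, zero_add] at hap
        rw [hap, show n - m + 1 + (m - 1) = n from by omega]
      rw [hsplit, List.filter_append]
      rw [pv_filter_win_short ics ng m (n - m + 1) (m - 1) hm.symm hm1 ?_]
      · simp
      · intro i hi
        rw [List.mem_range'] at hi
        omega

-- ===== VERDICT (by name: the statement is the Claim_ definition above) =====
theorem get_desired_ngram_phrases_spec : Claim_equal_get_desired_ngram_phrases := by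
  intro ng ic s _hdom _hpre
  unfold Spec_get_desired_ngram_phrases
  rw [pv_A_eq_filter, pv_alt_eq_filter]
  rfl
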